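-- pv_equiv track=rewrite | github.com/PorcoRosso85/home | bin/src/requirement/graph/application/semantic_validator.py | _has_contradictory_auth_policies
-- ===== SOURCE A (Python) =====
-- from typing import List, Dict, Any, TypedDict
--
-- def _has_contradictory_auth_policies(requirements: List[Dict[str, Any]]) -> bool:
--     """認証ポリシーに矛盾があるかチェック"""
--     approaches = set()
--
--     for req in requirements:
--         metadata = req.get("Metadata", {})
--         approach = metadata.get("approach")
--         if approach:
--             approaches.add(approach)
--
--     # "minimal"と"strict"が両方存在する場合は矛盾
--     return "minimal" in approaches and "strict" in approaches
-- ===== SOURCE B (Python) =====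
-- def _has_contradictory_auth_policies(requirements):
--     """認証ポリシーに矛盾があるかチェック"""
--     has_minimal = any(req.get("Metadata", {}).get("approach") == "minimal" for req in requirements)
--     has_strict = any(req.get("Metadata", {}).get("approach") == "strict" for req in requirements)
--     # "minimal"と"strict"が両方存在する場合は矛盾
--     return has_minimal and has_strict
-- ===== Notes on version B (the rewrite author's own statement) =====
-- stated objective: simpler
-- what changed: Drops the accumulated set entirely: two short-circuiting any() scans compute has_minimal and has_strict directly instead of building a set of all approaches and testing membership afterwards.
import Mathlib
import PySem

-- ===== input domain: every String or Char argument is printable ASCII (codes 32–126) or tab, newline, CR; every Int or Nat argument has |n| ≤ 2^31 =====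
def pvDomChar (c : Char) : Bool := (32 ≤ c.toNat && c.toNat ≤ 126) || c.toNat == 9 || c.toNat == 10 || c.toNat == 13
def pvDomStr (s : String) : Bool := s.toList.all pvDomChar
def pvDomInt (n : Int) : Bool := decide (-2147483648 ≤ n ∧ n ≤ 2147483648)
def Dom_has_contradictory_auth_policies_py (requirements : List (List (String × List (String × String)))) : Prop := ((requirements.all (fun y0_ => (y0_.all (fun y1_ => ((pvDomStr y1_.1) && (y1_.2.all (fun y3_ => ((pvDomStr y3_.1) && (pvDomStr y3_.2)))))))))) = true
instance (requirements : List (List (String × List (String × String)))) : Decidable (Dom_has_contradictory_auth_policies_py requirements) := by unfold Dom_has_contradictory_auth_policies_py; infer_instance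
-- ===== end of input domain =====

-- B drops A's accumulated set: two short-circuiting any-scans for "minimal" and "strict" replace
-- building a set of all approaches and testing membership afterwards.

-- ===== PORT A =====
-- loop: approaches = set(); for req in requirements: metadata = req.get("Metadata", {}); approach = metadata.get("approach"); if approach: approaches.add(approach)
def has_contradictory_auth_policies_py (requirements : List (List (String × List (String × String)))) : Bool :=
  let approaches : PySem.Set String :=
    requirements.foldl (fun approaches req =>
      let metadata := (PySem.Dict.mk req).getD "Metadata" []
      let approach := (PySem.Dict.mk metadata).get? "approach"
      match approach with
      | some a => if a ≠ "" then approaches.add a else approaches   -- 'if approach:' — non-empty string is truthy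
      | none => approaches) PySem.Set.empty
  PySem.Set.contains approaches "minimal" && PySem.Set.contains approaches "strict"

-- ===== PORT B =====
def pvGetApproach (req : List (String × List (String × String))) : Option String :=
  (PySem.Dict.mk ((PySem.Dict.mk req).getD "Metadata" [])).get? "approach"

def has_contradictory_auth_policies_py_alt (requirements : List (List (String × List (String × String)))) : Bool :=
  let has_minimal := requirements.any (fun req => pvGetApproach req == some "minimal")
  let has_strict := requirements.any (fun req => pvGetApproach req == some "strict")
  has_minimal && has_strict

-- ===== PRECONDITION & SPEC =====
def Spec_has_contradictory_auth_policies_py (requirements : List (List (String × List (String × String)))) (out : Bool) : Prop := out = has_contradictory_auth_policies_py_alt requirements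
instance (requirements : List (List (String × List (String × String)))) (out : Bool) : Decidable (Spec_has_contradictory_auth_policies_py requirements out) := by unfold Spec_has_contradictory_auth_policies_py; infer_instance

-- ===== CLAIM (what is proved, stated in full; the proofs are below) =====
def Claim_equal_has_contradictory_auth_policies_py : Prop := ∀ (requirements : List (List (String × List (String × String)))), Dom_has_contradictory_auth_policies_py requirements → Spec_has_contradictory_auth_policies_py requirements (has_contradictory_auth_policies_py requirements)

-- ===== LEMMAS AND PROOFS =====

-- A's loop step, named for the invariant lemma
def pvStepA (approaches : PySem.Set String) (req : List (String × List (String × String))) : PySem.Set String :=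
  match (PySem.Dict.mk ((PySem.Dict.mk req).getD "Metadata" [])).get? "approach" with
  | some a => if a ≠ "" then approaches.add a else approaches
  | none => approaches

lemma contains_pvStepA (s : PySem.Set String) (req : List (String × List (String × String)))
    (t : String) (ht : t ≠ "") :
    PySem.Set.contains (pvStepA s req) t = (PySem.Set.contains s t || (pvGetApproach req == some t)) := by
  unfold pvStepA pvGetApproach
  rcases h : (PySem.Dict.mk ((PySem.Dict.mk req).getD "Metadata" [])).get? "approach" with _ | a
  · simp
  · by_cases ha : a = ""
    · subst ha
      simp [ht]
    · simp only [ha, ne_eq, not_false_iff, if_true]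
      simp only [PySem.Set.contains, PySem.Set.add]
      have htne : t ≠ a → ((a == t) = false) := fun h => by
        simpa using fun h' => h h'.symm
      split_ifs with has
      · by_cases hat : t = a
        · subst hat; simpa using has
        · simp [htne hat]
      · by_cases hat : t = a
        · subst hat; simp
        · simp [hat, htne hat]

-- membership in the folded set ↔ some requirement carries approach t (for non-empty t)
lemma contains_foldl (requirements : List (List (String × List (String × String))))
    (s : PySem.Set String) (t : String) (ht : t ≠ "") :
    PySem.Set.contains (requirements.foldl pvStepA s) t
      = (PySem.Set.contains s t || requirements.any (fun req => pvGetApproach req == some t)) := by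
  induction requirements generalizing s with
  | nil => simp
  | cons r rs ih =>
      simp only [List.foldl_cons, List.any_cons]
      rw [ih, contains_pvStepA s r t ht]
      cases PySem.Set.contains s t <;> simp

-- ===== VERDICT (by name: the statement is the Claim_ definition above) =====
theorem has_contradictory_auth_policies_py_spec : Claim_equal_has_contradictory_auth_policies_py := by
  intro requirements _
  show has_contradictory_auth_policies_py requirements = has_contradictory_auth_policies_py_alt requirements
  unfold has_contradictory_auth_policies_py has_contradictory_auth_policies_py_alt
  have hA : (fun (approaches : PySem.Set String) req =>
      let metadata := (PySem.Dict.mk req).getD "Metadata" []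
      let approach := (PySem.Dict.mk metadata).get? "approach"
      match approach with
      | some a => if a ≠ "" then approaches.add a else approaches
      | none => approaches) = pvStepA := by
    funext s r; rfl
  simp only [hA]
  rw [contains_foldl _ _ _ (by decide), contains_foldl _ _ _ (by decide)]
  simp [PySem.Set.empty, PySem.Set.contains]
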